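-- pv_equiv track=rewrite | github.com/slohani-22/Hallucination-Aware-NLP | main.py | is_name_variant
-- ===== SOURCE A (Python) =====
-- def is_name_variant(correct, predicted):
--     """
--     Count person-name variants as correct when the shorter name appears
--     inside the longer one in the same token order.
--
--     Examples:
--     - 'roy orbison' vs 'roy kelton orbison' -> True
--     - 'gregory hines' vs 'dancer gregory hines' -> True
--     """
--     c_tokens = correct.split()
--     p_tokens = predicted.split()
--
--     # Only apply this to answers that look like names / multiword entities
--     if len(c_tokens) < 2 or len(p_tokens) < 2:
--         return False
--
--     # shorter vs longer token list
--     if len(c_tokens) <= len(p_tokens):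
--         short_tokens = c_tokens
--         long_tokens = p_tokens
--     else:
--         short_tokens = p_tokens
--         long_tokens = c_tokens
--
--     i = 0
--     for token in long_tokens:
--         if i < len(short_tokens) and token == short_tokens[i]:
--             i += 1
--
--     return i == len(short_tokens)
-- ===== SOURCE B (Python) =====
-- def is_name_variant(correct, predicted):
--     c_tokens = correct.split()
--     p_tokens = predicted.split()
--     if len(c_tokens) < 2 or len(p_tokens) < 2:
--         return False
--     if len(c_tokens) <= len(p_tokens):
--         short_tokens, long_tokens = c_tokens, p_tokens
--     else:
--         short_tokens, long_tokens = p_tokens, c_tokens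
--     # inverted index: token -> ascending list of its positions in long_tokens
--     pos = {}
--     for j, tok in enumerate(long_tokens):
--         pos.setdefault(tok, []).append(j)
--     # greedy match via the index: for each short token take the first recorded
--     # position strictly after the previous match
--     cur = -1
--     for tok in short_tokens:
--         nxt = None
--         for j in pos.get(tok, []):
--             if j > cur:
--                 nxt = j
--                 break
--         if nxt is None:
--             return False
--         cur = nxt
--     return True
-- ===== Notes on version B (the rewrite author's own statement) =====
-- stated objective: alternative
-- what changed: Instead of one greedy pass over the longer token list with an index counter into the shorter one, B first builds an inverted index (dict token -> ascending list of positions in the longer list) and then matches each short token by taking its first indexed position strictly after the previous match; the longer list is never scanned during matching.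
import Mathlib
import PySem

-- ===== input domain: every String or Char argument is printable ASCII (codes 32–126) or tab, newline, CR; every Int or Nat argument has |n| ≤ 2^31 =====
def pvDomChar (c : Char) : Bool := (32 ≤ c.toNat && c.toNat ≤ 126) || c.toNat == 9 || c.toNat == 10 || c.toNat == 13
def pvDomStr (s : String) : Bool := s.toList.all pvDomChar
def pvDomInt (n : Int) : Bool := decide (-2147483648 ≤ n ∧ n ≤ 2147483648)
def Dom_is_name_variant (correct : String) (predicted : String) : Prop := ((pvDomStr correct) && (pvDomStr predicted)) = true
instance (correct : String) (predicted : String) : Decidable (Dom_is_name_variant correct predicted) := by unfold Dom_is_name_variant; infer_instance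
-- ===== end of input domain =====

-- B replaces A's single greedy pass over the longer token list by an inverted index
-- (token -> ascending positions) queried per short token (alternative algorithm; similar cost).

-- ===== PORT A =====
def is_name_variant (correct : String) (predicted : String) : Bool :=
  let c_tokens := PySem.Str.split₀ correct
  let p_tokens := PySem.Str.split₀ predicted
  if c_tokens.length < 2 || p_tokens.length < 2 then false
  else
    let short_tokens := if c_tokens.length ≤ p_tokens.length then c_tokens else p_tokens
    let long_tokens := if c_tokens.length ≤ p_tokens.length then p_tokens else c_tokens
    let i := long_tokens.foldl
      (fun i token => if i < short_tokens.length ∧ short_tokens.getD i "" = token then i + 1 else i) 0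
    decide (i = short_tokens.length)

-- ===== PORT B =====
-- inner `for j in pos.get(tok, []): if j > cur: nxt = j; break` — the first listed position > cur
def pvFirstGt (cur : Int) : List Int → Option Int
  | [] => none
  | j :: js => if j > cur then some j else pvFirstGt cur js

-- the matching loop over short_tokens with its early `return False`
def pvMatch (pos : PySem.Dict String (List Int)) : List String → Int → Bool
  | [], _ => true
  | t :: ts, cur =>
    match pvFirstGt cur (pos.getD t []) with
    | none => false
    | some j => pvMatch pos ts j

def is_name_variant_alt (correct : String) (predicted : String) : Bool :=
  let c_tokens := PySem.Str.split₀ correct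
  let p_tokens := PySem.Str.split₀ predicted
  if c_tokens.length < 2 || p_tokens.length < 2 then false
  else
    let short_tokens := if c_tokens.length ≤ p_tokens.length then c_tokens else p_tokens
    let long_tokens := if c_tokens.length ≤ p_tokens.length then p_tokens else c_tokens
    -- pos.setdefault(tok, []).append(j) over enumerate(long_tokens)
    let pos := (PySem.List.enumerate long_tokens).foldl
      (fun d p => d.modify p.2 [] (· ++ [p.1])) PySem.Dict.empty
    pvMatch pos short_tokens (-1)

-- ===== PRECONDITION & SPEC =====
def Spec_is_name_variant (correct : String) (predicted : String) (out : Bool) : Prop := out = is_name_variant_alt correct predicted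
instance (correct : String) (predicted : String) (out : Bool) : Decidable (Spec_is_name_variant correct predicted out) := by unfold Spec_is_name_variant; infer_instance

-- ===== CLAIM (what is proved, stated in full; the proofs are below) =====
def Claim_equal_is_name_variant : Prop := ∀ (correct : String) (predicted : String), Dom_is_name_variant correct predicted → Spec_is_name_variant correct predicted (is_name_variant correct predicted)

-- ===== LEMMAS AND PROOFS =====

-- Reference subsequence test both sides are reduced to: consume the first match, recurse.
def pvConsume1 (t : String) : List String → Option (List String)
  | [] => none
  | x :: xs => if x = t then some xs else pvConsume1 t xs

def pvAllIn : List String → List String → Bool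
  | [], _ => true
  | t :: ts, l =>
    match pvConsume1 t l with
    | none => false
    | some rest => pvAllIn ts rest

-- positions (from k) at which token t occurs
def pvOcc (t : String) : List String → Int → List Int
  | [], _ => []
  | x :: xs, k => (if x = t then [k] else []) ++ pvOcc t xs (k + 1)

-- A's counter reaches s.length from i iff the reference test consumes s.drop i.
lemma pv_counter_eq_consume (s : List String) :
    ∀ (l : List String) (i : Nat), i ≤ s.length →
      decide (l.foldl (fun i token => if i < s.length ∧ s.getD i "" = token then i + 1 else i) i
        = s.length) = pvAllIn (s.drop i) l := by
  intro l
  induction l with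
  | nil =>
    intro i hi
    rcases Nat.lt_or_eq_of_le hi with h | h
    · rw [List.drop_eq_getElem_cons h]
      simp [pvAllIn, pvConsume1, Nat.ne_of_lt h]
    · simp [h, pvAllIn]
  | cons t l' ih =>
    intro i hi
    rcases Nat.lt_or_eq_of_le hi with h | h
    · by_cases he : s.getD i "" = t
      · have hcond : i < s.length ∧ s.getD i "" = t := ⟨h, he⟩
        have hst : s[i] = t := by rwa [List.getD_eq_getElem s "" h] at he
        rw [List.drop_eq_getElem_cons h, List.foldl_cons, if_pos hcond, ih (i + 1) h]
        simp [pvAllIn, pvConsume1, hst]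
      · have hcond : ¬ (i < s.length ∧ s.getD i "" = t) := fun hc => he hc.2
        have hne : ¬ t = s[i] := fun hh => he (by rw [List.getD_eq_getElem s "" h, hh])
        have hih := ih i (Nat.le_of_lt h)
        rw [List.drop_eq_getElem_cons h] at hih ⊢
        rw [List.foldl_cons, if_neg hcond, hih]
        simp [pvAllIn, pvConsume1, hne]
    · have hcond : ¬ (i < s.length ∧ s.getD i "" = t) := fun hc => absurd hc.1 (by omega)
      rw [List.foldl_cons, if_neg hcond, ih i hi, h]
      simp [pvAllIn]

-- the dict built by the setdefault/append loop holds exactly pvOcc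
lemma pv_getD_pos (l : List String) (t : String) :
    ((PySem.List.enumerate l).foldl (fun d p => d.modify p.2 [] (· ++ [p.1]))
      (PySem.Dict.empty : PySem.Dict String (List Int))).getD t [] = pvOcc t l 0 := by
  have hmap : (PySem.List.enumerate l).foldl (fun d p => d.modify p.2 [] (· ++ [p.1]))
      (PySem.Dict.empty : PySem.Dict String (List Int))
      = ((PySem.List.enumerate l).map (fun p => (p.2, p.1))).foldl
        (fun d p => d.modify p.1 [] (· ++ [p.2])) PySem.Dict.empty := by
    rw [List.foldl_map]
  rw [hmap, PySem.Dict.getD_foldl_modify_append, PySem.Dict.getD_empty]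
  show ((((PySem.List.enumerate l 0).map (fun p => (p.2, p.1))).filter
      (fun p => p.1 == t)).map (·.2)) = pvOcc t l 0
  have : ∀ (l : List String) (k : Int),
      ((((PySem.List.enumerate l k).map (fun p => (p.2, p.1))).filter
        (fun p => p.1 == t)).map (·.2)) = pvOcc t l k := by
    intro l
    induction l with
    | nil => intro k; simp [PySem.List.enumerate_nil, pvOcc]
    | cons x xs ih =>
      intro k
      rw [PySem.List.enumerate_cons]
      by_cases hx : x = t
      · simp [pvOcc, hx, ih]
      · simp [pvOcc, hx, ih]
  exact this l 0

-- positions ≤ cur can be dropped before searching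
lemma pv_skip (t : String) :
    ∀ (m : Nat) (l : List String) (k cur : Int), k + m ≤ cur + 1 →
      pvFirstGt cur (pvOcc t l k) = pvFirstGt cur (pvOcc t (l.drop m) (k + m)) := by
  intro m
  induction m with
  | zero => intro l k cur _; simp
  | succ n ih =>
    intro l k cur h
    cases l with
    | nil => simp [pvOcc]
    | cons x xs =>
      have hk : ¬ ((k : Int) > cur) := by push_cast at h; omega
      have hstep : pvFirstGt cur (pvOcc t (x :: xs) k) = pvFirstGt cur (pvOcc t xs (k + 1)) := by
        by_cases hx : x = t
        · simp [pvOcc, hx, pvFirstGt, hk]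
        · simp [pvOcc, hx]
      rw [hstep, ih xs (k + 1) cur (by push_cast at h ⊢; omega)]
      have : k + 1 + (n : Int) = k + ((n : Nat) + 1 : Nat) := by push_cast; ring
      rw [List.drop_succ_cons, this]

-- once cur is below every listed position, the index search mirrors pvConsume1
lemma pv_fresh (t : String) :
    ∀ (l : List String) (k cur : Int), cur < k →
      (pvFirstGt cur (pvOcc t l k) = none ∧ pvConsume1 t l = none) ∨
      (∃ (i : Nat), pvFirstGt cur (pvOcc t l k) = some (k + i) ∧
        pvConsume1 t l = some (l.drop (i + 1))) := by
  intro l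
  induction l with
  | nil => intro k cur _; left; exact ⟨rfl, rfl⟩
  | cons x xs ih =>
    intro k cur hcur
    by_cases hx : x = t
    · right
      refine ⟨0, ?_, ?_⟩
      · simp [pvOcc, hx, pvFirstGt, hcur]
      · simp [pvConsume1, hx]
    · have hocc : pvOcc t (x :: xs) k = pvOcc t xs (k + 1) := by simp [pvOcc, hx]
      have hcons : pvConsume1 t (x :: xs) = pvConsume1 t xs := by simp [pvConsume1, hx]
      rcases ih (k + 1) cur (by omega) with ⟨h1, h2⟩ | ⟨i, h1, h2⟩
      · left; rw [hocc, hcons]; exact ⟨h1, h2⟩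
      · right
        refine ⟨i + 1, ?_, ?_⟩
        · rw [hocc, h1]; push_cast; ring_nf
        · rw [hcons, h2]; rfl

-- the matching loop over the index equals the reference test on the unread suffix
lemma pv_match_eq (long : List String) (pos : PySem.Dict String (List Int))
    (hpos : ∀ t, pos.getD t [] = pvOcc t long 0) :
    ∀ (short : List String) (cur : Int) (m : Nat), cur + 1 = (m : Int) →
      pvMatch pos short cur = pvAllIn short (long.drop m) := by
  intro short
  induction short with
  | nil => intro cur m _; simp [pvMatch, pvAllIn]
  | cons t ts ih =>
    intro cur m hm
    have hskip : pvFirstGt cur (pvOcc t long 0) = pvFirstGt cur (pvOcc t (long.drop m) m) := by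
      have := pv_skip t m long 0 cur (by omega)
      simpa using this
    have hcur : cur < (m : Int) := by omega
    rcases pv_fresh t (long.drop m) m cur hcur with ⟨h1, h2⟩ | ⟨i, h1, h2⟩
    · show (match pvFirstGt cur (pos.getD t []) with
        | none => false | some j => pvMatch pos ts j) = pvAllIn (t :: ts) (long.drop m)
      rw [hpos, hskip, h1]
      simp [pvAllIn, h2]
    · show (match pvFirstGt cur (pos.getD t []) with
        | none => false | some j => pvMatch pos ts j) = pvAllIn (t :: ts) (long.drop m)
      rw [hpos, hskip, h1]
      have hrec := ih ((m : Int) + i) (m + i + 1) (by push_cast; ring)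
      rw [List.drop_drop] at h2
      simp only [pvAllIn, h2]
      rw [hrec, show m + i + 1 = m + (i + 1) from by omega]

-- ===== VERDICT (by name: the statement is the Claim_ definition above) =====
theorem is_name_variant_spec : Claim_equal_is_name_variant := by
  intro correct predicted _
  unfold Spec_is_name_variant
  simp only [is_name_variant, is_name_variant_alt]
  split
  · rfl
  · set c := PySem.Str.split₀ correct
    set p := PySem.Str.split₀ predicted
    set short := if c.length ≤ p.length then c else p with hshort
    set long := if c.length ≤ p.length then p else c with hlong
    have hA := pv_counter_eq_consume short long 0 (Nat.zero_le _)
    have hB := pv_match_eq long _ (fun t => pv_getD_pos long t) short (-1) 0 (by norm_num)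
    simp only [List.drop_zero] at hA hB
    rw [hA, hB]
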